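-- pv_equiv track=rewrite | github.com/danmar/cppcheck | tools/matchcompiler.py | _parseStringComparison
-- ===== SOURCE A (Python) =====
-- def _parseStringComparison(line, pos1):
--     startPos = 0
--     pos = pos1
--     inString = False
--     while pos < len(line):
--         if inString:
--             if line[pos] == '\\':
--                 pos += 1
--             elif line[pos] == '"':
--                 inString = False
--                 endPos = pos + 1
--                 return startPos, endPos
--         elif line[pos] == '"':
--             startPos = pos
--             inString = True
--         pos += 1
--
--     return None
-- ===== SOURCE B (Python) =====
-- def _parseStringComparison(line, pos1):
--     # Phase 1: the opening quote is the first '"' at or after pos1.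
--     start = line.find('"', pos1)
--     if start == -1:
--         return None
--     # Phase 2: try each subsequent '"' as the closing quote; a candidate
--     # closes the literal iff the run of backslashes immediately before it
--     # has even length (an odd run means the quote itself is escaped).
--     q = line.find('"', start + 1)
--     while q != -1:
--         b = q - 1
--         while line[b] == '\\':
--             b -= 1
--         if (q - 1 - b) % 2 == 0:
--             return start, q + 1
--         q = line.find('"', q + 1)
--     return None
-- ===== Notes on version B (the rewrite author's own statement) =====
-- stated objective: faster
-- what changed: Replaces A's skip-2 escape-simulating state machine with a candidate-testing algorithm: B enumerates quote positions via repeated C-level str.find and accepts the first whose immediately preceding backslash run has even length, so the per-character Python loop disappears except inside backslash runs.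
-- outside the precondition, e.g. on _parseStringComparison('"a"', -3): A returns (-3, 0), B returns (0, 3); on _parseStringComparison('abc', -10): A raises IndexError, B returns None
import Mathlib
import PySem

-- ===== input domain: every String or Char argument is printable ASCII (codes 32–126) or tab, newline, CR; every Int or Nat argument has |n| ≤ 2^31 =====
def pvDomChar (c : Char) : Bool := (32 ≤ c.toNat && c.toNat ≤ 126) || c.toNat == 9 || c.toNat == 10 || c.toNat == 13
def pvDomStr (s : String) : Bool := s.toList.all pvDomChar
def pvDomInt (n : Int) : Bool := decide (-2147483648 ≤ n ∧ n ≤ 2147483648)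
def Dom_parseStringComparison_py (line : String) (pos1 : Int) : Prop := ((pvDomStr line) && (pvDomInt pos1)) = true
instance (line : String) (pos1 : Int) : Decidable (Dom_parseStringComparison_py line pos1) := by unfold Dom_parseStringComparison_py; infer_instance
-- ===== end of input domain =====

-- B replaces A's escape-simulating state machine by candidate testing: it enumerates quote
-- positions via repeated str.find and accepts the first one preceded by an even backslash
-- run (objective: faster, measured).

-- ===== PORT A =====
-- A's while-loop: fuel-indexed structural recursion over the same state (pos, startPos, inString).
-- On '\\' inside a string A does pos += 1 and then pos += 1 at the loop end, i.e. the next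
-- iteration starts at pos + 2.
def pvALoop (cs : List Char) (len : Int) : Nat → Int → Int → Bool → Option (Int × Int)
  | 0, _, _, _ => none
  | fuel + 1, pos, startPos, inString =>
    if pos < len then
      match PySem.List.pyGet? cs pos with
      | none => none  -- IndexError (unreachable under Pre_)
      | some c =>
        if inString then
          if c = '\\' then pvALoop cs len fuel (pos + 2) startPos inString
          else if c = '"' then some (startPos, pos + 1)
          else pvALoop cs len fuel (pos + 1) startPos inString
        else if c = '"' then pvALoop cs len fuel (pos + 1) pos true
        else pvALoop cs len fuel (pos + 1) startPos inString
    else none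

def parseStringComparison_py (line : String) (pos1 : Int) : Option (Int × Int) :=
  pvALoop line.toList (line.toList.length : Int)
    (((line.toList.length : Int) - pos1).toNat + 1) pos1 0 false

-- ===== PORT B =====
-- Source B's inner while loop: walk left over the backslash run before a quote candidate,
-- returning the final value of b.
def pvRunBack (cs : List Char) : Nat → Int → Int
  | 0, b => b
  | fuel + 1, b =>
    if PySem.List.pyGet? cs b = some '\\' then pvRunBack cs fuel (b - 1) else b

-- Source B's outer while loop over the successive quote candidates delivered by line.find.
def pvBHunt (cs : List Char) (start : Int) : Nat → Int → Option (Int × Int)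
  | 0, _ => none
  | fuel + 1, q =>
    if q = -1 then none
    else
      let b := pvRunBack cs (q.toNat + 1) (q - 1)
      if PySem.Int.mod (q - 1 - b) 2 = 0 then some (start, q + 1)
      else pvBHunt cs start fuel (PySem.Chars.findFrom cs ['"'] (q + 1) none)

def parseStringComparison_py_alt (line : String) (pos1 : Int) : Option (Int × Int) :=
  if PySem.Str.findFrom line "\"" pos1 = -1 then none
  else
    pvBHunt line.toList (PySem.Str.findFrom line "\"" pos1) (line.toList.length + 1)
      (PySem.Str.findFrom line "\"" ((PySem.Str.findFrom line "\"" pos1) + 1))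

-- ===== PRECONDITION & SPEC =====
-- Pre_ excludes negative pos1, a corner no caller uses: there A raises IndexError (pos1 < -len)
-- or else Python's negative-index wraparound gives A and B each an accidental, unspecified
-- reading of the start position.
def Pre_parseStringComparison_py (line : String) (pos1 : Int) : Prop := 0 ≤ pos1
instance (line : String) (pos1 : Int) : Decidable (Pre_parseStringComparison_py line pos1) := by unfold Pre_parseStringComparison_py; infer_instance

def pvWitness_parseStringComparison_py : String × Int := ("x = \"a\\\"b\" ;", 0)

def Spec_parseStringComparison_py (line : String) (pos1 : Int) (out : Option (Int × Int)) : Prop := out = parseStringComparison_py_alt line pos1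
instance (line : String) (pos1 : Int) (out : Option (Int × Int)) : Decidable (Spec_parseStringComparison_py line pos1 out) := by unfold Spec_parseStringComparison_py; infer_instance

-- ===== CLAIM (what is proved, stated in full; the proofs are below) =====
def Claim_equal_parseStringComparison_py : Prop := ∀ (line : String) (pos1 : Int), Dom_parseStringComparison_py line pos1 → Pre_parseStringComparison_py line pos1 → Spec_parseStringComparison_py line pos1 (parseStringComparison_py line pos1)

-- ===== LEMMAS AND PROOFS =====

-- pvBrun cs i = length of the maximal backslash run ending at index i - 1
def pvBrun (cs : List Char) : Nat → Nat
  | 0 => 0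
  | i + 1 => if cs[i]? = some '\\' then pvBrun cs i + 1 else 0

-- reference function both ports are reduced to: from position p upward, return the first
-- quote preceded by an even backslash run (with the opening position s in the answer)
def pvRef (cs : List Char) (s : Int) : Nat → Nat → Option (Int × Int)
  | 0, _ => none
  | fuel + 1, p =>
    if p < cs.length then
      if cs[p]? = some '"' ∧ pvBrun cs p % 2 = 0 then some (s, (p : Int) + 1)
      else pvRef cs s fuel (p + 1)
    else none

theorem pvRef_none_of_ge (cs : List Char) (s : Int) :
    ∀ (fuel p : Nat), cs.length ≤ p → pvRef cs s fuel p = none := by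
  intro fuel p h
  cases fuel with
  | zero => rfl
  | succ f => simp only [pvRef]; rw [if_neg (by omega)]

theorem pvRef_no_quote (cs : List Char) (s : Int) :
    ∀ (fuel p : Nat), (∀ i : Nat, p ≤ i → cs[i]? ≠ some '"') →
      pvRef cs s fuel p = none := by
  intro fuel
  induction fuel with
  | zero => intro p _; rfl
  | succ f ih =>
    intro p hq
    simp only [pvRef]
    split_ifs with h1 h2
    · exact absurd h2.1 (hq p le_rfl)
    · exact ih (p + 1) (fun i hi => hq i (by omega))
    · rfl

theorem pvRef_skip (cs : List Char) (s : Int) :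
    ∀ (k p : Nat), (∀ i : Nat, p ≤ i → i < p + k → cs[i]? ≠ some '"') →
      pvRef cs s (cs.length + 1 - p) p = pvRef cs s (cs.length + 1 - (p + k)) (p + k) := by
  intro k
  induction k with
  | zero => intro p _; rfl
  | succ k ih =>
    intro p hq
    by_cases hp : p < cs.length
    · have hfe : cs.length + 1 - p = (cs.length - p) + 1 := by omega
      rw [hfe]
      simp only [pvRef]
      rw [if_pos hp]
      rw [if_neg (show ¬(cs[p]? = some '"' ∧ pvBrun cs p % 2 = 0) by
        intro hc; exact hq p le_rfl (by omega) hc.1)]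
      have h1 : cs.length - p = cs.length + 1 - (p + 1) := by omega
      rw [h1, ih (p + 1) (fun i hi1 hi2 => hq i (by omega) (by omega))]
      rw [show p + 1 + k = p + (k + 1) by omega]
    · rw [pvRef_none_of_ge cs s _ p (by omega),
          pvRef_none_of_ge cs s _ (p + (k + 1)) (by omega)]

-- the backslash run before index i is shorter than the distance to any quote below i
theorem pvBrun_lt (cs : List Char) :
    ∀ (i j : Nat), j < i → cs[j]? = some '"' → pvBrun cs i < i - j := by
  intro i
  induction i with
  | zero => intro j h _; omega
  | succ m ih =>
    intro j hj hq
    simp only [pvBrun]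
    split_ifs with hb
    · have hjm : j ≠ m := by intro h; subst h; rw [hq] at hb; simp at hb
      have := ih j (by omega) hq
      omega
    · omega

-- the inner while loop of Source B computes exactly the backslash-run length
theorem pvRunBack_eq (cs : List Char) :
    ∀ (fuel i : Nat), pvBrun cs i ≤ fuel → pvBrun cs i < i →
      pvRunBack cs fuel ((i : Int) - 1) = (i : Int) - 1 - (pvBrun cs i : Int) := by
  intro fuel
  induction fuel with
  | zero =>
    intro i h1 h2
    have h0 : pvBrun cs i = 0 := by omega
    rw [h0]
    simp [pvRunBack]
  | succ f ih =>
    intro i h1 h2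
    obtain ⟨m, rfl⟩ : ∃ m, i = m + 1 := ⟨i - 1, by omega⟩
    have hcast : ((m + 1 : Nat) : Int) - 1 = ((m : Nat) : Int) := by push_cast; ring
    rw [hcast]
    simp only [pvRunBack, PySem.List.pyGet?_natCast]
    by_cases hb : cs[m]? = some '\\'
    · rw [if_pos hb]
      have hrun : pvBrun cs (m + 1) = pvBrun cs m + 1 := by simp [pvBrun, hb]
      rw [hrun] at h1 h2 ⊢
      have := ih m (by omega) (by omega)
      rw [show (m : Int) - 1 = ((m : Nat) : Int) - 1 by rfl] at this
      rw [this]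
      push_cast; ring
    · rw [if_neg hb]
      have hrun : pvBrun cs (m + 1) = 0 := by simp [pvBrun, hb]
      rw [hrun]
      push_cast; ring

-- A's scan in the inString state returns the first quote preceded by an even backslash run
theorem pvAScan_to_ref (cs : List Char) (s : Int) :
    ∀ (fuel p : Nat), cs.length - p < fuel → pvBrun cs p % 2 = 0 →
      pvALoop cs (cs.length : Int) fuel (p : Int) s true =
        pvRef cs s (cs.length + 1 - p) p := by
  intro fuel
  induction fuel with
  | zero => intro p h _; omega
  | succ f ih =>
    intro p hfuel heven
    by_cases hp : p < cs.length
    · have hpe : cs[p]? = some cs[p] := List.getElem?_eq_getElem hp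
      have hfe : cs.length + 1 - p = (cs.length - p) + 1 := by omega
      simp only [pvALoop]
      rw [if_pos (show ((p : Nat) : Int) < ((cs.length : Nat) : Int) by exact_mod_cast hp),
          PySem.List.pyGet?_natCast, hpe]
      simp only [if_true]
      by_cases hbs : cs[p] = '\\'
      · rw [if_pos hbs]
        have hb1 : pvBrun cs (p + 1) = pvBrun cs p + 1 := by
          simp [pvBrun, hpe, hbs]
        have he2 : pvBrun cs (p + 2) % 2 = 0 := by
          by_cases h2 : cs[p + 1]? = some '\\'
          · have : pvBrun cs (p + 2) = pvBrun cs (p + 1) + 1 := by simp [pvBrun, h2]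
            omega
          · have : pvBrun cs (p + 2) = 0 := by simp [pvBrun, h2]
            omega
        rw [show ((p : Nat) : Int) + 2 = ((p + 2 : Nat) : Int) by push_cast; ring]
        rw [ih (p + 2) (by omega) he2]
        -- now equate the two pvRef entry points
        rw [hfe]
        simp only [pvRef]
        rw [if_pos hp]
        rw [if_neg (show ¬(cs[p]? = some '"' ∧ pvBrun cs p % 2 = 0) by
          intro hc; rw [hpe, hbs] at hc; simp at hc)]
        by_cases hp1 : p + 1 < cs.length
        · have h1 : cs.length - p = (cs.length - (p + 1)) + 1 := by omega
          rw [h1]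
          simp only [pvRef]
          rw [if_pos hp1]
          rw [if_neg (show ¬(cs[p + 1]? = some '"' ∧ pvBrun cs (p + 1) % 2 = 0) by
            intro hc
            have := hc.2
            omega)]
          congr 1
          omega
        · rw [show cs.length - p = 1 by omega]
          simp only [pvRef]
          rw [if_neg hp1]
          rw [pvRef_none_of_ge cs s _ (p + 2) (by omega)]
      · rw [if_neg hbs]
        by_cases hq : cs[p] = '"'
        · rw [if_pos hq]
          rw [hfe]
          simp only [pvRef]
          rw [if_pos hp, if_pos (show cs[p]? = some '"' ∧ pvBrun cs p % 2 = 0 from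
            ⟨by rw [hpe, hq], heven⟩)]
        · rw [if_neg hq]
          have he1 : pvBrun cs (p + 1) % 2 = 0 := by
            have : pvBrun cs (p + 1) = 0 := by
              simp only [pvBrun]
              rw [if_neg (by rw [hpe]; intro hc; exact hbs (by injection hc))]
            omega
          rw [show ((p : Nat) : Int) + 1 = ((p + 1 : Nat) : Int) by push_cast; ring]
          rw [ih (p + 1) (by omega) he1]
          rw [hfe]
          simp only [pvRef]
          rw [if_pos hp]
          rw [if_neg (show ¬(cs[p]? = some '"' ∧ pvBrun cs p % 2 = 0) by
            intro hc; rw [hpe] at hc; exact hq (Option.some.inj hc.1))]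
          congr 1
          omega
    · simp only [pvALoop]
      rw [if_neg (by exact_mod_cast hp)]
      rw [pvRef_none_of_ge cs s _ p (by omega)]

-- a singleton list is an infix iff its element is a member
theorem pv_singleton_infix {c : Char} {l : List Char} : [c] <:+: l ↔ c ∈ l := by
  constructor
  · intro h; exact h.mem (List.mem_singleton_self c)
  · intro h
    obtain ⟨s, t, rfl⟩ := List.append_of_mem h
    exact ⟨s, t, by simp⟩

-- a singleton prefix of a drop pins down the element at that index
theorem pv_prefix_drop_iff {c : Char} {l : List Char} {i : Nat} :
    [c] <+: l.drop i ↔ l[i]? = some c := by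
  constructor
  · intro h
    obtain ⟨t, ht⟩ := h
    have : (l.drop i)[0]? = some c := by rw [← ht]; rfl
    rwa [List.getElem?_drop, Nat.add_zero] at this
  · intro h
    have h0 : (l.drop i)[0]? = some c := by rwa [List.getElem?_drop, Nat.add_zero]
    cases hd : l.drop i with
    | nil => rw [hd] at h0; simp at h0
    | cons a t =>
      rw [hd] at h0; simp at h0
      exact ⟨t, by simp [h0]⟩

-- B's quote-candidate hunt, entered just after a quote at index q, also returns the first
-- later quote preceded by an even backslash run
theorem pvBHunt_to_ref (cs : List Char) (s : Int) :
    ∀ (fuel q : Nat), q < cs.length → cs[q]? = some '"' → cs.length - q ≤ fuel →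
      pvBHunt cs s fuel (PySem.Chars.findFrom cs ['"'] ((q : Int) + 1) none) =
        pvRef cs s (cs.length - q) (q + 1) := by
  intro fuel
  induction fuel with
  | zero => intro q hq _ hf; omega
  | succ f ih =>
    intro q hqlt hq hfuel
    rw [show ((q : Nat) : Int) + 1 = ((q + 1 : Nat) : Int) by push_cast; ring]
    rw [PySem.Chars.findFrom_natCast cs ['"'] (q + 1) (by omega)]
    by_cases hfind : PySem.Chars.find (cs.drop (q + 1)) ['"'] = -1
    · rw [if_pos hfind]
      simp only [pvBHunt, if_true]
      have hno : ∀ i : Nat, q + 1 ≤ i → cs[i]? ≠ some '"' := by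
        rw [PySem.Chars.find_eq_neg_one_iff] at hfind
        intro i hi hcon
        apply hfind
        rw [pv_singleton_infix]
        have hdrop : (cs.drop (q + 1))[i - (q + 1)]? = some '"' := by
          rw [List.getElem?_drop, show q + 1 + (i - (q + 1)) = i by omega]
          exact hcon
        exact List.mem_of_getElem? hdrop
      rw [pvRef_no_quote cs s _ (q + 1) hno]
    · rw [if_neg hfind]
      have hge : 0 ≤ PySem.Chars.find (cs.drop (q + 1)) ['"'] := by
        have := PySem.Chars.neg_one_le_find (cs.drop (q + 1)) ['"']
        omega
      obtain ⟨dn, hdn⟩ : ∃ m : Nat,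
          PySem.Chars.find (cs.drop (q + 1)) ['"'] = (m : Int) :=
        ⟨(PySem.Chars.find (cs.drop (q + 1)) ['"']).toNat, (Int.toNat_of_nonneg hge).symm⟩
      obtain ⟨hpre', hmin'⟩ := PySem.Chars.find_spec (s := cs.drop (q + 1)) (sub := ['"']) hge
      rw [hdn] at hpre' hmin'
      simp only [Int.toNat_natCast] at hpre' hmin'
      rw [List.drop_drop] at hpre'
      have hqidx : cs[q + 1 + dn]? = some '"' := by
        rw [← pv_prefix_drop_iff]
        exact hpre'
      set q' : Nat := q + 1 + dn with hq'
      have hq'lt : q' < cs.length := by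
        rcases Nat.lt_or_ge q' cs.length with h | h
        · exact h
        · rw [List.getElem?_eq_none h] at hqidx
          simp at hqidx
      have hminq : ∀ i : Nat, q + 1 ≤ i → i < q' → cs[i]? ≠ some '"' := by
        intro i hi1 hi2 hcon
        refine hmin' (i - (q + 1)) (by omega) ?_
        rw [List.drop_drop, show q + 1 + (i - (q + 1)) = i by omega, pv_prefix_drop_iff]
        exact hcon
      rw [hdn]
      have hargs : ((q + 1 : Nat) : Int) + ((dn : Nat) : Int) = ((q' : Nat) : Int) := by
        rw [hq']; push_cast; ring
      rw [hargs]
      -- run-length computation inside the hunt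
      have hbrun_lt : pvBrun cs q' < q' - q := pvBrun_lt cs q' q (by omega) hq
      have hrb : pvRunBack cs (((q' : Nat) : Int).toNat + 1) (((q' : Nat) : Int) - 1) =
          ((q' : Nat) : Int) - 1 - (pvBrun cs q' : Int) := by
        rw [Int.toNat_natCast]
        exact pvRunBack_eq cs (q' + 1) q' (by omega) (by omega)
      have hmod : PySem.Int.mod (((q' : Nat) : Int) - 1 -
          (((q' : Nat) : Int) - 1 - (pvBrun cs q' : Int))) 2 =
          ((pvBrun cs q' : Int)) % 2 := by
        rw [show ((q' : Nat) : Int) - 1 - (((q' : Nat) : Int) - 1 - (pvBrun cs q' : Int)) =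
            (pvBrun cs q' : Int) by ring]
        exact PySem.Int.mod_eq_emod_of_pos (by omega)
      simp only [pvBHunt]
      rw [if_neg (by omega)]
      rw [hrb, hmod]
      -- line up the reference side: skip to q', then act on the parity there
      have hskip := pvRef_skip cs s dn (q + 1) (fun i h1 h2 => hminq i h1 (by omega))
      rw [show cs.length - q = cs.length + 1 - (q + 1) by omega, hskip,
          show q + 1 + dn = q' by omega]
      have hfq' : cs.length + 1 - q' = (cs.length - q') + 1 := by omega
      by_cases hpar : pvBrun cs q' % 2 = 0
      · rw [if_pos (by omega)]
        rw [hfq']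
        simp only [pvRef]
        rw [if_pos hq'lt, if_pos ⟨hqidx, hpar⟩]
      · rw [if_neg (by omega)]
        have hstep : pvRef cs s (cs.length + 1 - q') q' =
            pvRef cs s (cs.length - q') (q' + 1) := by
          rw [hfq']
          simp only [pvRef]
          rw [if_pos hq'lt, if_neg (show ¬(cs[q']? = some '"' ∧ pvBrun cs q' % 2 = 0) by
            intro hc; exact hpar hc.2)]
        rw [hstep]
        exact ih q' hq'lt hqidx (by omega)

-- If no quote occurs at or after position p, A's phase-1 loop returns none.
theorem pvALoop_no_quote (cs : List Char) :
    ∀ (fuel : Nat) (p : Nat) (s : Int),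
      (∀ i : Nat, p ≤ i → cs[i]? ≠ some '"') →
      pvALoop cs (cs.length : Int) fuel (p : Int) s false = none := by
  intro fuel
  induction fuel with
  | zero => intro p s _; rfl
  | succ f ih =>
    intro p s hq
    by_cases hp : p < cs.length
    · have hpe : cs[p]? = some cs[p] := List.getElem?_eq_getElem hp
      have hcp : cs[p] ≠ '"' := by
        intro hc; exact hq p le_rfl (by rw [hpe, hc])
      simp only [pvALoop]
      rw [if_pos (show ((p : Nat) : Int) < ((cs.length : Nat) : Int) by exact_mod_cast hp)]
      rw [PySem.List.pyGet?_natCast, hpe]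
      simp only [Bool.false_eq_true, if_false]
      rw [if_neg hcp]
      have hcast : (p : Int) + 1 = ((p + 1 : Nat) : Int) := by push_cast; ring
      rw [hcast]
      exact ih (p + 1) s (fun i hi => hq i (by omega))
    · simp only [pvALoop]
      rw [if_neg (show ¬ ((p : Nat) : Int) < ((cs.length : Nat) : Int) by exact_mod_cast hp)]

-- A's phase-1 loop reaches the first quote at p + k, turns inString on, and from there
-- computes the reference answer.
theorem pvALoop_advance (cs : List Char) :
    ∀ (k fuel : Nat) (p : Nat) (s : Int),
      p + k < cs.length →
      cs[p + k]? = some '"' →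
      (∀ i : Nat, p ≤ i → i < p + k → cs[i]? ≠ some '"') →
      cs.length - p < fuel →
      pvALoop cs (cs.length : Int) fuel (p : Int) s false =
        pvRef cs ((p + k : Nat) : Int) (cs.length - (p + k)) (p + k + 1) := by
  intro k
  induction k with
  | zero =>
    intro fuel p s hlt hq _ hfuel
    obtain ⟨f, rfl⟩ : ∃ g, fuel = g + 1 := ⟨fuel - 1, by omega⟩
    simp only [pvALoop]
    rw [if_pos (by exact_mod_cast hlt)]
    rw [PySem.List.pyGet?_natCast]
    simp only [Nat.add_zero] at hq hlt ⊢
    rw [hq]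
    simp only [Bool.false_eq_true, if_false, if_pos]
    have hcast : (p : Int) + 1 = ((p + 1 : Nat) : Int) := by push_cast; ring
    rw [hcast]
    have heven : pvBrun cs (p + 1) % 2 = 0 := by
      have : pvBrun cs (p + 1) = 0 := by
        simp only [pvBrun]
        rw [if_neg (by rw [hq]; intro hc; injection hc with hc'; exact absurd hc' (by decide))]
      omega
    rw [pvAScan_to_ref cs ((p : Nat) : Int) f (p + 1) (by omega) heven]
    congr 1
    omega
  | succ k ih =>
    intro fuel p s hlt hq hmin hfuel
    obtain ⟨f, rfl⟩ : ∃ g, fuel = g + 1 := ⟨fuel - 1, by omega⟩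
    simp only [pvALoop]
    have hp : p < cs.length := by omega
    rw [if_pos (by exact_mod_cast hp)]
    rw [PySem.List.pyGet?_natCast]
    have hpe : cs[p]? = some cs[p] := List.getElem?_eq_getElem hp
    rw [hpe]
    simp only [Bool.false_eq_true, if_false]
    have hcp : cs[p] ≠ '"' := by
      intro hc; exact hmin p le_rfl (by omega) (by rw [hpe, hc])
    rw [if_neg hcp]
    have hcast : (p : Int) + 1 = ((p + 1 : Nat) : Int) := by push_cast; ring
    rw [hcast]
    have h1 : p + 1 + k = p + (k + 1) := by omega
    have := ih f (p + 1) s (by omega) (by rw [h1]; exact hq)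
      (fun i hi hi2 => hmin i (by omega) (by omega)) (by omega)
    rw [this, h1]

-- ===== VERDICT (by name: the statement is the Claim_ definition above) =====
theorem parseStringComparison_py_spec : Claim_equal_parseStringComparison_py := by
  intro line pos1 _ hpre
  unfold Spec_parseStringComparison_py parseStringComparison_py parseStringComparison_py_alt
  set cs := line.toList with hcs
  set n := cs.length with hn
  obtain ⟨p, rfl⟩ : ∃ q : Nat, pos1 = (q : Int) :=
    ⟨pos1.toNat, (Int.toNat_of_nonneg hpre).symm⟩
  rw [PySem.Str.findFrom_eq]
  have hsub : "\"".toList = ['"'] := rfl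
  by_cases hpn : n < p
  · -- start past the end: A's loop does not run, B's find returns -1
    have hfA : pvALoop cs (n : Int) (((n : Int) - (p : Int)).toNat + 1) (p : Int) 0 false = none := by
      simp only [pvALoop]
      rw [if_neg (by exact_mod_cast Nat.not_lt.mpr (le_of_lt hpn))]
    have hfB : PySem.Chars.findFrom cs "\"".toList (p : Int) none = -1 := by
      simp only [PySem.Chars.findFrom]
      rw [if_pos]
      have h1 : (0 : Int) ≤ (p : Int) := Int.natCast_nonneg p
      simp only [if_neg (not_lt.mpr h1)]
      exact_mod_cast hpn
    rw [hfA, hfB]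
    simp
  · rw [Nat.not_lt] at hpn
    by_cases hfind : PySem.Chars.find (cs.drop p) "\"".toList = -1
    · -- no quote at or after p: both return none
      have hF : PySem.Chars.findFrom cs "\"".toList (p : Int) none = -1 := by
        rw [PySem.Chars.findFrom_natCast cs "\"".toList p hpn, if_pos hfind]
      have hno : ¬ ['"'] <:+: cs.drop p := by
        rw [← hsub]
        rw [PySem.Chars.find_eq_neg_one_iff] at hfind
        exact hfind
      rw [pv_singleton_infix] at hno
      have hq : ∀ i : Nat, p ≤ i → cs[i]? ≠ some '"' := by
        intro i hi hcontra
        apply hno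
        have hdrop : (cs.drop p)[i - p]? = some '"' := by
          rw [List.getElem?_drop]
          rw [show p + (i - p) = i by omega]
          exact hcontra
        exact List.mem_of_getElem? hdrop
      rw [pvALoop_no_quote cs _ p 0 hq, hF]
      simp
    · -- first quote at q = p + dn: A hands over to the inString scan there,
      -- B starts its candidate hunt there; both equal the reference function
      have hge : 0 ≤ PySem.Chars.find (cs.drop p) "\"".toList := by
        have := PySem.Chars.neg_one_le_find (cs.drop p) "\"".toList
        omega
      obtain ⟨dn, hdn⟩ : ∃ m : Nat, PySem.Chars.find (cs.drop p) "\"".toList = (m : Int) :=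
        ⟨(PySem.Chars.find (cs.drop p) "\"".toList).toNat, (Int.toNat_of_nonneg hge).symm⟩
      obtain ⟨hpre', hmin'⟩ := PySem.Chars.find_spec (s := cs.drop p) (sub := "\"".toList) hge
      rw [hdn] at hpre' hmin'
      rw [hsub] at hpre' hmin'
      simp only [Int.toNat_natCast] at hpre' hmin'
      rw [List.drop_drop] at hpre'
      have hqidx : cs[p + dn]? = some '"' := by
        rw [← pv_prefix_drop_iff]
        exact hpre'
      have hqlt : p + dn < n := by
        rcases Nat.lt_or_ge (p + dn) n with h | h
        · exact h
        · rw [List.getElem?_eq_none h] at hqidx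
          simp at hqidx
      have hminq : ∀ i : Nat, p ≤ i → i < p + dn → cs[i]? ≠ some '"' := by
        intro i hi1 hi2 hcon
        refine hmin' (i - p) (by omega) ?_
        rw [List.drop_drop, show p + (i - p) = i by omega, pv_prefix_drop_iff]
        exact hcon
      have hA := pvALoop_advance cs dn (((n : Int) - (p : Int)).toNat + 1) p 0
        hqlt hqidx hminq (by omega)
      have hF : PySem.Chars.findFrom cs "\"".toList (p : Int) none = ((p + dn : Nat) : Int) := by
        rw [PySem.Chars.findFrom_natCast cs "\"".toList p hpn, if_neg hfind, hdn]
        push_cast; ring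
      rw [hA, hF]
      rw [if_neg (by push_cast; omega)]
      rw [PySem.Str.findFrom_eq, hsub]
      rw [pvBHunt_to_ref cs ((p + dn : Nat) : Int) (cs.length + 1) (p + dn) hqlt hqidx (by omega)]
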